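-- pv_equiv track=rewrite | github.com/rmakarenko/TheRevenant | tank.py | string_to_massive
-- ===== SOURCE A (Python) =====
-- def string_to_massive(H1, W1, string):  # эта функция превратит строку в двумерный массив
--     total_list = []
--     current_list = []
--     for i in range(H1):
--         for j in range(W1):
--             current_list.append(string[j + i * W1])
--         total_list.append(current_list)
--         current_list = []
--     return total_list
-- ===== SOURCE B (Python) =====
-- def string_to_massive(H1, W1, string):
--     # Divide and conquer over the row range: split [lo, hi) in half and concatenate.
--     def build(lo, hi):
--         if hi - lo <= 0:
--             return []
--         if hi - lo == 1:
--             return [[string[lo * W1 + j] for j in range(W1)]]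
--         mid = (lo + hi) // 2
--         return build(lo, mid) + build(mid, hi)
--     return build(0, H1)
-- ===== Notes on version B (the rewrite author's own statement) =====
-- stated objective: alternative
-- what changed: Replaces A's nested i/j loops with an explicit current_list accumulator by a recursive divide-and-conquer that splits the row range [lo,hi) in half and concatenates the two halves, each row built as a comprehension; Pre_ only excludes the inputs where A raises IndexError (string shorter than H1*W1 with H1,W1 positive).
import Mathlib
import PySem

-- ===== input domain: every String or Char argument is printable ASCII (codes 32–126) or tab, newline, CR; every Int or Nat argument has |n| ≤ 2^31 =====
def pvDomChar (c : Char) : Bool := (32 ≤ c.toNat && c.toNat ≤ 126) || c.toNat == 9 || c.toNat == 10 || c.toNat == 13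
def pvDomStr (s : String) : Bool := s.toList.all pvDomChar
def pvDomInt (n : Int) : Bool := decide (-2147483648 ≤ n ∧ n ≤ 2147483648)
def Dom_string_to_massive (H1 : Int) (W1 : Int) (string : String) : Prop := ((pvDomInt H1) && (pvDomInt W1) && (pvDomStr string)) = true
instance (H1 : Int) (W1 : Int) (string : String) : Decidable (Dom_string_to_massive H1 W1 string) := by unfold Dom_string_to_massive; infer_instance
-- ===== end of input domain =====

-- B replaces A's nested accumulator loops by a divide-and-conquer recursion over the row range (alternative decomposition, same cost).
-- pvCell string t = string[t] as a 1-character Python string ("" only where Python would raise IndexError; Pre_ excludes that).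
-- ===== PORT A =====
def pvCell (string : String) (t : Int) : String :=
  match PySem.Str.pyGet? string t with
  | some c => String.ofList [c]
  | none => ""

def string_to_massive (H1 : Int) (W1 : Int) (string : String) : List (List String) :=
  -- state = (total_list, current_list)
  ((PySem.List.pyRange 0 H1 1).foldl
    (fun (st : List (List String) × List String) i =>
      let cur := (PySem.List.pyRange 0 W1 1).foldl
        (fun c j => c ++ [pvCell string (j + i * W1)]) st.2
      (st.1 ++ [cur], ([] : List String)))
    ([], [])).1

-- ===== PORT B =====
-- build lo hi = the rows lo..hi-1, by splitting the range at mid = (lo+hi)//2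
def pvAltBuild (W1 : Int) (string : String) (lo hi : Int) : List (List String) :=
  if hi - lo ≤ 0 then []
  else if hi - lo = 1 then
    [(PySem.List.pyRange 0 W1 1).map (fun j => pvCell string (lo * W1 + j))]
  else
    pvAltBuild W1 string lo (PySem.Int.floordiv (lo + hi) 2) ++
    pvAltBuild W1 string (PySem.Int.floordiv (lo + hi) 2) hi
termination_by (hi - lo).toNat
decreasing_by
  · have hm : PySem.Int.floordiv (lo + hi) 2 = (lo + hi) / 2 :=
      PySem.Int.floordiv_eq_ediv_of_pos (by omega)
    omega
  · have hm : PySem.Int.floordiv (lo + hi) 2 = (lo + hi) / 2 :=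
      PySem.Int.floordiv_eq_ediv_of_pos (by omega)
    omega

def string_to_massive_alt (H1 : Int) (W1 : Int) (string : String) : List (List String) :=
  pvAltBuild W1 string 0 H1

-- ===== PRECONDITION & SPEC =====
-- Pre_ excludes exactly the inputs where Python A raises IndexError (H1 > 0, W1 > 0 and the string shorter than H1*W1).
def Pre_string_to_massive (H1 : Int) (W1 : Int) (string : String) : Prop :=
  H1 ≤ 0 ∨ W1 ≤ 0 ∨ H1 * W1 ≤ (PySem.Str.len string : Int)
instance (H1 : Int) (W1 : Int) (string : String) : Decidable (Pre_string_to_massive H1 W1 string) := by unfold Pre_string_to_massive; infer_instance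
def pvWitness_string_to_massive : Int × Int × String := (2, 3, "abcdef")
def Spec_string_to_massive (H1 : Int) (W1 : Int) (string : String) (out : List (List String)) : Prop := out = string_to_massive_alt H1 W1 string
instance (H1 : Int) (W1 : Int) (string : String) (out : List (List String)) : Decidable (Spec_string_to_massive H1 W1 string out) := by unfold Spec_string_to_massive; infer_instance

-- ===== CLAIM (what is proved, stated in full; the proofs are below) =====
def Claim_equal_string_to_massive : Prop := ∀ (H1 : Int) (W1 : Int) (string : String), Dom_string_to_massive H1 W1 string → Pre_string_to_massive H1 W1 string → Spec_string_to_massive H1 W1 string (string_to_massive H1 W1 string)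

-- ===== LEMMAS AND PROOFS =====

-- A characterised as a nested map over Nat ranges.
lemma lemA (H1 W1 : Int) (s : String) :
    string_to_massive H1 W1 s =
      (List.range H1.toNat).map (fun (i : Nat) =>
        (List.range W1.toNat).map (fun (j : Nat) => pvCell s ((j : Int) + (i : Int) * W1))) := by
  have key : ∀ (l : List Int) (acc : List (List String)),
      (l.foldl (fun (st : List (List String) × List String) i =>
        (st.1 ++ [(PySem.List.pyRange 0 W1 1).foldl (fun c j => c ++ [pvCell s (j + i * W1)]) st.2], ([] : List String)))
        (acc, ([] : List String))).1
      = acc ++ l.map (fun i => (PySem.List.pyRange 0 W1 1).map (fun j => pvCell s (j + i * W1))) := by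
    intro l
    induction l with
    | nil => intro acc; simp
    | cons x xs ih =>
      intro acc
      simp only [List.foldl_cons, List.map_cons]
      rw [PySem.List.foldl_append_singleton_eq_map]
      simp only [List.nil_append]
      rw [ih]
      simp
  simp only [string_to_massive]
  rw [key]
  simp only [List.nil_append, PySem.List.pyRange_one, List.map_map, Function.comp_def, zero_add, sub_zero]

-- the row B builds for row index i
def pvRowB (W1 : Int) (s : String) (i : Int) : List String :=
  (PySem.List.pyRange 0 W1 1).map (fun j => pvCell s (i * W1 + j))

lemma lemBuild (W1 : Int) (s : String) : ∀ (n : Nat) (lo hi : Int), (hi - lo).toNat = n →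
    pvAltBuild W1 s lo hi = (List.range n).map (fun (t : Nat) => pvRowB W1 s (lo + (t : Int))) := by
  intro n
  induction n using Nat.strong_induction_on with
  | _ n ih =>
    intro lo hi hn
    rw [pvAltBuild]
    by_cases h0 : hi - lo ≤ 0
    · rw [if_pos h0]
      have : n = 0 := by omega
      simp [this]
    · rw [if_neg h0]
      by_cases h1 : hi - lo = 1
      · rw [if_pos h1]
        have : n = 1 := by omega
        subst this
        simp [pvRowB]
      · rw [if_neg h1]
        have hm : PySem.Int.floordiv (lo + hi) 2 = (lo + hi) / 2 :=
          PySem.Int.floordiv_eq_ediv_of_pos (by omega)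
        set mid := PySem.Int.floordiv (lo + hi) 2 with hmid
        have hlt1 : lo < mid := by omega
        have hlt2 : mid < hi := by omega
        rw [ih (mid - lo).toNat (by omega) lo mid rfl,
            ih (hi - mid).toNat (by omega) mid hi rfl]
        have hsplit : n = (mid - lo).toNat + (hi - mid).toNat := by omega
        rw [hsplit, List.range_add, List.map_append, List.map_map]
        congr 1
        apply List.map_congr_left
        intro t _
        simp only [Function.comp_apply]
        congr 1
        push_cast
        omega

lemma mainEq (H1 W1 : Int) (s : String) :
    string_to_massive H1 W1 s = string_to_massive_alt H1 W1 s := by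
  rw [lemA, string_to_massive_alt, lemBuild W1 s H1.toNat 0 H1 (by omega)]
  apply List.map_congr_left
  intro i _
  simp only [pvRowB, PySem.List.pyRange_one, List.map_map, Function.comp_def, sub_zero]
  apply List.map_congr_left
  intro j _
  congr 1
  ring

-- ===== VERDICT (by name: the statement is the Claim_ definition above) =====
theorem string_to_massive_spec : Claim_equal_string_to_massive := by
  intro H1 W1 s _ _
  unfold Spec_string_to_massive
  exact mainEq H1 W1 s
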